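-- pv_equiv track=rewrite | github.com/akal0/profitabledge | services/mt5-worker/adapters/meta_trader5.py | _canonical_symbol
-- ===== SOURCE A (Python) =====
-- def _canonical_symbol(symbol: str) -> str:
--     upper = symbol.strip().upper()
--     alphanumeric = "".join(char for char in upper if char.isalnum())
--     for index in range(max(0, len(alphanumeric) - 5)):
--         candidate = alphanumeric[index:index + 6]
--         if len(candidate) == 6 and candidate.isalpha():
--             return candidate
--     return upper
-- ===== SOURCE B (Python) =====
-- def _canonical_symbol(symbol: str) -> str:
--     upper = symbol.strip().upper()
--     alphanumeric = "".join(char for char in upper if char.isalnum())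
--     run = 0
--     for index, char in enumerate(alphanumeric):
--         run = run + 1 if char.isalpha() else 0
--         if run == 6:
--             return alphanumeric[index - 5:index + 1]
--     return upper
-- ===== Notes on version B (the rewrite author's own statement) =====
-- stated objective: alternative
-- what changed: Replaces the windowed scan (a fresh 6-char slice built and re-tested with isalpha at every start index) by a single left-to-right pass keeping a run-length counter of consecutive alphabetic characters, slicing only once when the counter first reaches 6.
import Mathlib
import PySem

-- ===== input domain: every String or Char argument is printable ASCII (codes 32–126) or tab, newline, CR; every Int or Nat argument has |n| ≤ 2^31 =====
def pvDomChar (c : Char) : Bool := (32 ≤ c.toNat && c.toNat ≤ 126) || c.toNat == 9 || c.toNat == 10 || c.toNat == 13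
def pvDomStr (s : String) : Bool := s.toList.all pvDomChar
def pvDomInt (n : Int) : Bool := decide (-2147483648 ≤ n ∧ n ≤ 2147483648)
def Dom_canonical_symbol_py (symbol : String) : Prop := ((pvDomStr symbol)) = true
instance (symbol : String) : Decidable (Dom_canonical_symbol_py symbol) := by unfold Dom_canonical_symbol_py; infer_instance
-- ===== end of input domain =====

-- B replaces A's per-index 6-character window slicing by a single pass with a run-length
-- counter of consecutive alphabetic characters (objective: alternative, same asymptotic cost).

-- ===== PORT A =====
-- the for-loop over range(max(0, len(alphanumeric) - 5)) with early return
def canonLoopA (alnum upper : List Char) : List Nat → List Char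
  | [] => upper
  | i :: rest =>
    if (PySem.List.slice alnum (some (i : Int)) (some ((i : Int) + 6))).length == 6 &&
       PySem.Chars.strIsalpha (PySem.List.slice alnum (some (i : Int)) (some ((i : Int) + 6))) then
      PySem.List.slice alnum (some (i : Int)) (some ((i : Int) + 6))
    else canonLoopA alnum upper rest

def canonical_symbol_py (symbol : String) : String :=
  let upper := PySem.Chars.upper (PySem.Chars.strip symbol.toList)
  let alphanumeric := upper.filter PySem.Chars.isalnum
  -- range(max(0, len(alphanumeric) - 5)): Nat subtraction is exactly max(0, len - 5)
  String.mk (canonLoopA alphanumeric upper (List.range (alphanumeric.length - 5)))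

-- ===== PORT B =====
-- single pass: `run` counts consecutive alphabetic chars; slice once when run hits 6
def canonLoopB (alnum : List Char) (i run : Nat) : Option (List Char) :=
  if h : i < alnum.length then
    if (if PySem.Chars.isalpha alnum[i] then run + 1 else 0) == 6 then
      some (PySem.List.slice alnum (some ((i : Int) - 5)) (some ((i : Int) + 1)))
    else canonLoopB alnum (i + 1) (if PySem.Chars.isalpha alnum[i] then run + 1 else 0)
  else none
termination_by alnum.length - i

def canonical_symbol_py_alt (symbol : String) : String :=
  let upper := PySem.Chars.upper (PySem.Chars.strip symbol.toList)
  let alphanumeric := upper.filter PySem.Chars.isalnum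
  match canonLoopB alphanumeric 0 0 with
  | some c => String.mk c
  | none => String.mk upper

-- ===== PRECONDITION & SPEC =====
def Spec_canonical_symbol_py (symbol : String) (out : String) : Prop := out = canonical_symbol_py_alt symbol
instance (symbol : String) (out : String) : Decidable (Spec_canonical_symbol_py symbol out) := by unfold Spec_canonical_symbol_py; infer_instance

-- ===== CLAIM (what is proved, stated in full; the proofs are below) =====
def Claim_equal_canonical_symbol_py : Prop := ∀ (symbol : String), Dom_canonical_symbol_py symbol → Spec_canonical_symbol_py symbol (canonical_symbol_py symbol)

-- ===== LEMMAS AND PROOFS =====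

-- the window condition A tests at start index j, as a plain predicate
def predA (l : List Char) (j : Nat) : Bool :=
  decide (j + 6 ≤ l.length) && ((l.drop j).take 6).all PySem.Chars.isalpha

lemma slice_window (l : List Char) (j : Nat) :
    PySem.List.slice l (some (j : Int)) (some ((j : Int) + 6)) = (l.drop j).take 6 := by
  have h := PySem.List.slice_natCast_add l j 6
  exact_mod_cast h

lemma condA_eq (l : List Char) (j : Nat) :
    ((PySem.List.slice l (some (j : Int)) (some ((j : Int) + 6))).length == 6 &&
      PySem.Chars.strIsalpha (PySem.List.slice l (some (j : Int)) (some ((j : Int) + 6))))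
      = predA l j := by
  rw [slice_window]
  by_cases h6 : j + 6 ≤ l.length
  · have hlen : ((l.drop j).take 6).length = 6 := by
      simp [List.length_take, List.length_drop]; omega
    simp [predA, h6, hlen, PySem.Chars.strIsalpha, List.isEmpty_iff, ← List.length_eq_zero_iff, hlen]
  · simp [predA, h6]
    intro h
    exact absurd h (by omega)

lemma loopA_eq (l u : List Char) (js : List Nat) :
    canonLoopA l u js = (match js.find? (predA l) with
      | some j => (l.drop j).take 6
      | none => u) := by
  induction js with
  | nil => simp [canonLoopA]
  | cons j rest ih =>
    rw [canonLoopA, condA_eq]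
    cases hp : predA l j with
    | true => simp [List.find?_cons, hp, slice_window]
    | false => simp [List.find?_cons, hp, ih]

lemma find?_range_some (p : Nat → Bool) (n j : Nat) (hj : j < n) (hpj : p j = true)
    (hlt : ∀ k < j, p k = false) : (List.range n).find? p = some j := by
  have hsplit : List.range n = List.range' 0 j ++ List.range' j (n - j) := by
    have h := List.range'_append (s := 0) (m := j) (n := n - j) (step := 1)
    simp only [Nat.zero_add, Nat.one_mul] at h
    have h2 : j + (n - j) = n := by omega
    rw [h2] at h
    rw [List.range_eq_range', ← h]
  have h1 : (List.range' 0 j).find? p = none := by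
    apply List.find?_eq_none.mpr
    intro x hx
    have hxj : x < j := by
      have := List.mem_range'_1.mp hx
      omega
    simp [hlt x hxj]
  have h2 : n - j = (n - j - 1) + 1 := by omega
  rw [hsplit, List.find?_append, h1, h2, List.range'_succ, List.find?_cons, hpj]
  rfl

lemma loopB_eq (l : List Char) : ∀ (d i run : Nat), l.length - i = d → i ≤ l.length →
    run ≤ 5 → run ≤ i →
    (∀ k (hk : k < l.length), i - run ≤ k → k < i → PySem.Chars.isalpha l[k] = true) →
    (∀ j, j < i - run → predA l j = false) →
    canonLoopB l i run = ((List.range (l.length - 5)).find? (predA l)).map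
      (fun j => (l.drop j).take 6) := by
  intro d
  induction d with
  | zero =>
    intro i run hd hi _ _ _ hno
    rw [canonLoopB, dif_neg (by omega)]
    have hnone : (List.range (l.length - 5)).find? (predA l) = none := by
      apply List.find?_eq_none.mpr
      intro j hj
      have hjlt : j < l.length - 5 := List.mem_range.mp hj
      simp [hno j (by omega)]
    rw [hnone]
    rfl
  | succ d ih =>
    intro i run hd hi hr5 hri halpha hno
    have hilt : i < l.length := by omega
    rw [canonLoopB, dif_pos hilt]
    by_cases hc : PySem.Chars.isalpha l[i] = true
    · rw [if_pos hc]
      by_cases h6 : run + 1 = 6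
      · have hi5 : 5 ≤ i := by omega
        rw [if_pos (by simp [h6])]
        have hsl : PySem.List.slice l (some ((i : Int) - 5)) (some ((i : Int) + 1))
            = (l.drop (i - 5)).take 6 := by
          rw [PySem.List.slice_toNat l (a := (i : Int) - 5) (b := (i : Int) + 1) (by omega) (by omega)]
          have e1 : ((i : Int) + 1).toNat - ((i : Int) - 5).toNat = 6 := by omega
          have e2 : ((i : Int) - 5).toNat = i - 5 := by omega
          rw [e1, e2]
        have hpj : predA l (i - 5) = true := by
          unfold predA
          have hle : i - 5 + 6 ≤ l.length := by omega
          simp only [hle, decide_true, Bool.true_and]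
          apply List.all_eq_true.mpr
          intro x hx
          obtain ⟨k, hk, hxk⟩ := List.getElem_of_mem hx
          have hk6 : k < 6 := by
            have h := hk
            simp [List.length_take, List.length_drop] at h
            omega
          have hkl : i - 5 + k < l.length := by omega
          have hxv : x = l[i - 5 + k]'hkl := by
            rw [← hxk]
            simp [List.getElem_take, List.getElem_drop]
          rw [hxv]
          by_cases hk5 : k = 5
          · have : i - 5 + k = i := by omega
            simp only [this]
            exact hc
          · exact halpha (i - 5 + k) hkl (by omega) (by omega)
        rw [find?_range_some (predA l) (l.length - 5) (i - 5) (by omega) hpj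
          (fun k hk => hno k (by omega))]
        simp [hsl]
      · rw [if_neg (by simp; omega)]
        apply ih (i + 1) (run + 1) (by omega) (by omega) (by omega) (by omega)
        · intro k hk h1 h2
          by_cases hki : k = i
          · subst hki; exact hc
          · exact halpha k hk (by omega) (by omega)
        · intro j hj
          exact hno j (by omega)
    · rw [if_neg hc, if_neg (by simp)]
      apply ih (i + 1) 0 (by omega) (by omega) (by omega) (by omega)
      · intro k hk h1 h2
        omega
      · intro j hj
        by_cases hjo : j < i - run
        · exact hno j hjo
        · -- the window starting at j contains the non-alphabetic character l[i]
          unfold predA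
          by_cases h6 : j + 6 ≤ l.length
          · simp only [h6, decide_true, Bool.true_and]
            apply List.all_eq_false.mpr
            have hlen : i - j < ((l.drop j).take 6).length := by
              simp [List.length_take, List.length_drop]; omega
            refine ⟨((l.drop j).take 6)[i - j]'hlen, List.getElem_mem hlen, ?_⟩
            have hxv : ((l.drop j).take 6)[i - j]'hlen = l[i]'hilt := by
              simp only [List.getElem_take, List.getElem_drop]
              congr 1
              omega
            rw [hxv]
            simpa using hc
          · simp [h6]

lemma main_lists (alnum upper : List Char) :
    String.mk (canonLoopA alnum upper (List.range (alnum.length - 5))) =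
    (match canonLoopB alnum 0 0 with
     | some c => String.mk c
     | none => String.mk upper) := by
  rw [loopA_eq,
    loopB_eq alnum alnum.length 0 0 (by omega) (by omega) (by omega) (by omega)
      (by intro k hk h1 h2; omega) (by intro j hj; omega)]
  cases hf : (List.range (alnum.length - 5)).find? (predA alnum) <;> simp [hf]

-- ===== VERDICT (by name: the statement is the Claim_ definition above) =====
theorem canonical_symbol_py_spec : Claim_equal_canonical_symbol_py := by
  intro symbol _
  show canonical_symbol_py symbol = canonical_symbol_py_alt symbol
  unfold canonical_symbol_py canonical_symbol_py_alt
  exact main_lists _ _
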